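-- pv_equiv track=rewrite | github.com/cn0304/edu-ragbot-final | data/Veritas College/script.py | _split_fee_paragraph
-- ===== SOURCE A (Python) =====
-- def _split_fee_paragraph(txt: str):
--     """
--     Split a fee paragraph like:
--       'RM16,900 Resource Fee: RM1,000 EMGS Fee: RM450'
--     into separate logical lines:
--       ['RM16,900', 'Resource Fee: RM1,000', 'EMGS Fee: RM450']
--     """
--     markers = ["Resource Fee:", "EMGS Fee:"]
--     parts = []
--     rest = txt
--
--     while True:
--         idx = -1
--         marker = None
--
--         # find earliest marker in the remaining text
--         for m in markers:
--             j = rest.find(m)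
--             if j != -1 and (idx == -1 or j < idx):
--                 idx = j
--                 marker = m
--
--         # no more markers – keep the remainder and stop
--         if idx == -1:
--             if rest.strip():
--                 parts.append(rest.strip())
--             break
--
--         # text before the marker (e.g. 'RM29,000')
--         prefix = rest[:idx].strip()
--         if prefix:
--             parts.append(prefix)
--
--         # move past the marker
--         rest = rest[idx + len(marker):]
--
--         # find where this marker's value ends (before next marker, if any)
--         next_idx = -1
--         for m in markers:
--             j = rest.find(m)
--             if j != -1 and (next_idx == -1 or j < next_idx):
--                 next_idx = j
--
--         if next_idx == -1:
--             value = rest.strip()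
--             rest = ""
--         else:
--             value = rest[:next_idx].strip()
--             rest = rest[next_idx:]
--
--         parts.append(f"{marker} {value}".strip())
--
--     return [p for p in parts if p]
-- ===== SOURCE B (Python) =====
-- def _split_fee_paragraph(txt: str):
--     """Single left-to-right tokenizing pass (collect segments and markers once),
--     then one assembly pass -- instead of A's repeated find-earliest-marker rescans."""
--     markers = ["Resource Fee:", "EMGS Fee:"]
--     segs = [""]          # segs[0] precedes the first marker, segs[k+1] follows marks[k]
--     marks = []
--     i = 0
--     n = len(txt)
--     while i < n:
--         for m in markers:
--             if txt.startswith(m, i):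
--                 marks.append(m)
--                 segs.append("")
--                 i += len(m)
--                 break
--         else:
--             segs[-1] += txt[i]
--             i += 1
--     parts = []
--     first = segs[0].strip()
--     if first:
--         parts.append(first)
--     for m, seg in zip(marks, segs[1:]):
--         parts.append(f"{m} {seg.strip()}".strip())
--     return parts
-- ===== Notes on version B (the rewrite author's own statement) =====
-- stated objective: alternative
-- what changed: replaced the repeated find-earliest-marker-and-slice while loop by a single left-to-right tokenizing pass that collects the prefix segment and all (marker, segment) pairs once, followed by one assembly pass
import Mathlib
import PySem

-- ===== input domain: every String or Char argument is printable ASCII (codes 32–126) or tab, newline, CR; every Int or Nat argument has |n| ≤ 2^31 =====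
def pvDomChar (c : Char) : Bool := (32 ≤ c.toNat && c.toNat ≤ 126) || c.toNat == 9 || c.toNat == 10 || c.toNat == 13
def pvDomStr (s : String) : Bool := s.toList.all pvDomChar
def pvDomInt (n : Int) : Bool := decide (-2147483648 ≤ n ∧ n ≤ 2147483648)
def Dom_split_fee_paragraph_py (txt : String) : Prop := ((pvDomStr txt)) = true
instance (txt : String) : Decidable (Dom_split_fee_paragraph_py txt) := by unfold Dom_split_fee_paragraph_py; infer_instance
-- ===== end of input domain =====

-- B replaces A's repeated find-earliest-marker-and-slice loop by one tokenizing pass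
-- (prefix segment + (marker, segment) pairs) followed by one assembly pass; same return value proved.


-- the two marker literals, shared by both ports
def pvM1 : List Char := "Resource Fee:".toList
def pvM2 : List Char := "EMGS Fee:".toList
def pvMarkers : List (List Char) := [pvM1, pvM2]

-- ===== PORT A =====
-- A's two inner for-loops (earliest marker in rest), A's while loop, then A itself.
def pvFindEarliest (rest : List Char) : Option (Int × List Char) :=
  pvMarkers.foldl (fun acc m =>
    let j := PySem.Chars.find rest m
    match acc with
    | none => if j ≠ -1 then some (j, m) else none
    | some (i, mk) => if j ≠ -1 ∧ j < i then some (j, m) else some (i, mk)) none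

theorem find_ne_nil {rest sub : List Char} (hs : sub ≠ []) (h : (0:Int) ≤ PySem.Chars.find rest sub) :
    rest ≠ [] := by
  have := (PySem.Chars.find_nonneg_iff rest sub).1 h
  rintro rfl
  simp [List.infix_nil] at this
  exact absurd this hs

theorem pvFE_shrink (rest : List Char) (idx : Int) (m : List Char)
    (h : pvFindEarliest rest = some (idx, m)) :
    0 ≤ idx ∧ 1 ≤ m.length ∧ rest ≠ [] := by
  have b1 := PySem.Chars.neg_one_le_find rest pvM1
  have b2 := PySem.Chars.neg_one_le_find rest pvM2
  by_cases h1 : PySem.Chars.find rest pvM1 = -1 <;>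
  by_cases h2 : PySem.Chars.find rest pvM2 = -1 <;>
    simp [pvFindEarliest, pvMarkers, h1, h2] at h
  · rcases h with ⟨rfl, rfl⟩
    exact ⟨by omega, by decide, find_ne_nil (sub := pvM2) (by decide) (by omega)⟩
  · rcases h with ⟨rfl, rfl⟩
    exact ⟨by omega, by decide, find_ne_nil (sub := pvM1) (by decide) (by omega)⟩
  · split at h <;> rcases h with ⟨rfl, rfl⟩
    · exact ⟨by omega, by decide, find_ne_nil (sub := pvM2) (by decide) (by omega)⟩
    · exact ⟨by omega, by decide, find_ne_nil (sub := pvM1) (by decide) (by omega)⟩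

def pvFindNext (rest : List Char) : Option Int :=
  pvMarkers.foldl (fun acc m =>
    let j := PySem.Chars.find rest m
    match acc with
    | none => if j ≠ -1 then some j else none
    | some i => if j ≠ -1 ∧ j < i then some j else some i) none

theorem pvFN_eq (rest : List Char) : pvFindNext rest = (pvFindEarliest rest).map Prod.fst := by
  by_cases h1 : PySem.Chars.find rest pvM1 = -1 <;>
  by_cases h2 : PySem.Chars.find rest pvM2 = -1 <;>
    simp [pvFindNext, pvFindEarliest, pvMarkers, h1, h2]
  split <;> simp

theorem pvFN_nonneg (rest : List Char) (j : Int) (h : pvFindNext rest = some j) : 0 ≤ j := by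
  rw [pvFN_eq] at h
  cases he : pvFindEarliest rest with
  | none => simp [he] at h
  | some p =>
    simp [he] at h
    obtain ⟨h0, -, -⟩ := pvFE_shrink rest p.1 p.2 (by simpa using he)
    omega

def pvLoopA (parts : List (List Char)) (rest : List Char) : List (List Char) :=
  match h : pvFindEarliest rest with
  | none =>
      if PySem.Chars.strip rest ≠ [] then parts ++ [PySem.Chars.strip rest] else parts
  | some (idx, m) =>
      let pre := PySem.Chars.strip (PySem.List.slice rest none (some idx))
      let parts1 := if pre ≠ [] then parts ++ [pre] else parts
      let rest1 := PySem.List.slice rest (some (idx + m.length)) none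
      match h2 : pvFindNext rest1 with
      | none =>
          pvLoopA (parts1 ++ [PySem.Chars.strip (m ++ ' ' :: PySem.Chars.strip rest1)]) []
      | some nidx =>
          pvLoopA (parts1 ++ [PySem.Chars.strip (m ++ ' ' ::
              PySem.Chars.strip (PySem.List.slice rest1 none (some nidx)))])
            (PySem.List.slice rest1 (some nidx) none)
  termination_by rest.length
  decreasing_by
  · obtain ⟨h0, h1, h2'⟩ := pvFE_shrink rest idx m h
    simp only [List.length_nil]
    cases rest with
    | nil => exact absurd rfl h2'
    | cons a l => simp
  · obtain ⟨h0, h1, h3⟩ := pvFE_shrink rest idx m h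
    have hn := pvFN_nonneg _ _ h2
    have e1 := PySem.List.slice_from (xs := PySem.List.slice rest (some (idx + m.length))) (a := nidx) hn
    have e2 := PySem.List.slice_from (xs := rest) (a := idx + m.length) (by omega)
    simp only [e2] at e1 ⊢
    simp only [e1, List.length_drop]
    have : 1 ≤ (idx + (m.length : Int)).toNat := by omega
    have : 1 ≤ rest.length := by
      cases rest with
      | nil => exact absurd rfl h3
      | cons a l => simp
    omega

def split_fee_paragraph_py (txt : String) : List String :=
  ((pvLoopA [] txt.toList).filter (fun p => !p.isEmpty)).map String.ofList

-- ===== PORT B =====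
-- B's tokenizing while loop: (segment before the first marker, [(marker, following segment), …])
def pvTok (l : List Char) : List Char × List (List Char × List Char) :=
  match l with
  | [] => ([], [])
  | c :: cs =>
      if PySem.Chars.startswith (c :: cs) pvM1 then
        let p := pvTok (List.drop pvM1.length (c :: cs))
        ([], (pvM1, p.1) :: p.2)
      else if PySem.Chars.startswith (c :: cs) pvM2 then
        let p := pvTok (List.drop pvM2.length (c :: cs))
        ([], (pvM2, p.1) :: p.2)
      else
        let p := pvTok cs
        (c :: p.1, p.2)
  termination_by l.length
  decreasing_by
  · simp [pvM1]
  · simp [pvM2]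
  · simp

def split_fee_paragraph_py_alt (txt : String) : List String :=
  let t := pvTok txt.toList
  let first := PySem.Chars.strip t.1
  ((if first ≠ [] then [first] else [])
    ++ t.2.map (fun q => PySem.Chars.strip (q.1 ++ ' ' :: PySem.Chars.strip q.2))).map String.ofList

-- ===== PRECONDITION & SPEC =====
def Spec_split_fee_paragraph_py (txt : String) (out : List String) : Prop := out = split_fee_paragraph_py_alt txt
instance (txt : String) (out : List String) : Decidable (Spec_split_fee_paragraph_py txt out) := by unfold Spec_split_fee_paragraph_py; infer_instance

-- ===== CLAIM (what is proved, stated in full; the proofs are below) =====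
def Claim_equal_split_fee_paragraph_py : Prop := ∀ (txt : String), Dom_split_fee_paragraph_py txt → Spec_split_fee_paragraph_py txt (split_fee_paragraph_py txt)

-- ===== LEMMAS AND PROOFS =====

def pvMatchAt (l : List Char) : Option (List Char) :=
  if pvM1 <+: l then some pvM1 else if pvM2 <+: l then some pvM2 else none

def pvRender (t : List Char × List (List Char × List Char)) : List (List Char) :=
  (if PySem.Chars.strip t.1 ≠ [] then [PySem.Chars.strip t.1] else [])
    ++ t.2.map (fun q => PySem.Chars.strip (q.1 ++ ' ' :: PySem.Chars.strip q.2))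

theorem no_prefix_of_find_neg (rest sub : List Char) (h : PySem.Chars.find rest sub = -1) :
    ∀ i, ¬ sub <+: rest.drop i := by
  have hinf := (PySem.Chars.find_eq_neg_one_iff rest sub).1 h
  intro i hp
  exact hinf ((PySem.Chars.isIn_iff_infix sub rest).1
    ((PySem.Chars.exists_prefix_drop_iff_isIn sub rest).1 ⟨i, hp⟩))

theorem pvFE_none (rest : List Char) (h : pvFindEarliest rest = none) :
    ∀ i, pvMatchAt (rest.drop i) = none := by
  by_cases h1 : PySem.Chars.find rest pvM1 = -1 <;>
  by_cases h2 : PySem.Chars.find rest pvM2 = -1 <;>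
    simp [pvFindEarliest, pvMarkers, h1, h2] at h
  · intro i
    simp [pvMatchAt, no_prefix_of_find_neg rest pvM1 h1 i, no_prefix_of_find_neg rest pvM2 h2 i]
  · split at h <;> simp at h

theorem pvFE_some (rest : List Char) (idx : Int) (m : List Char)
    (h : pvFindEarliest rest = some (idx, m)) :
    ∃ k : Nat, idx = (k : Int) ∧ (∀ i < k, pvMatchAt (rest.drop i) = none) ∧
      pvMatchAt (rest.drop k) = some m := by
  have b1 := PySem.Chars.neg_one_le_find rest pvM1
  have b2 := PySem.Chars.neg_one_le_find rest pvM2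
  by_cases h1 : PySem.Chars.find rest pvM1 = -1 <;>
  by_cases h2 : PySem.Chars.find rest pvM2 = -1 <;>
    simp [pvFindEarliest, pvMarkers, h1, h2] at h
  · -- m2 found only
    rcases h with ⟨rfl, rfl⟩
    obtain ⟨hs1, hs2⟩ := PySem.Chars.find_spec (s := rest) (sub := pvM2) (by omega)
    refine ⟨(PySem.Chars.find rest pvM2).toNat, by omega, ?_, ?_⟩
    · intro i _
      simp [pvMatchAt, no_prefix_of_find_neg rest pvM1 h1 i, hs2 i (by omega)]
    · simp [pvMatchAt, no_prefix_of_find_neg rest pvM1 h1 _, hs1]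
  · -- m1 found only
    rcases h with ⟨rfl, rfl⟩
    obtain ⟨hs1, hs2⟩ := PySem.Chars.find_spec (s := rest) (sub := pvM1) (by omega)
    refine ⟨(PySem.Chars.find rest pvM1).toNat, by omega, ?_, ?_⟩
    · intro i hi
      simp [pvMatchAt, no_prefix_of_find_neg rest pvM2 h2 i, hs2 i hi]
    · simp [pvMatchAt, hs1]
  · -- both found
    obtain ⟨hs1, hs2⟩ := PySem.Chars.find_spec (s := rest) (sub := pvM1) (by omega)
    obtain ⟨ht1, ht2⟩ := PySem.Chars.find_spec (s := rest) (sub := pvM2) (by omega)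
    split at h <;> rcases h with ⟨rfl, rfl⟩
    · -- j2 < j1 : m2 wins
      rename_i hlt
      refine ⟨(PySem.Chars.find rest pvM2).toNat, by omega, ?_, ?_⟩
      · intro i hi
        simp [pvMatchAt, hs2 i (by omega), ht2 i hi]
      · simp [pvMatchAt, hs2 (PySem.Chars.find rest pvM2).toNat (by omega), ht1]
    · -- j1 ≤ j2 : m1 wins
      rename_i hge
      refine ⟨(PySem.Chars.find rest pvM1).toNat, by omega, ?_, ?_⟩
      · intro i hi
        simp [pvMatchAt, hs2 i hi, ht2 i (by omega)]
      · simp [pvMatchAt, hs1]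

theorem pvMatchAt_some (l m : List Char) (h : pvMatchAt l = some m) :
    (m = pvM1 ∨ m = pvM2) ∧ m <+: l := by
  unfold pvMatchAt at h
  split_ifs at h with hp1 hp2 <;> simp_all

theorem pvMatchAt_none (l : List Char) (h : pvMatchAt l = none) :
    ¬ pvM1 <+: l ∧ ¬ pvM2 <+: l := by
  unfold pvMatchAt at h
  split_ifs at h with hp1 hp2 <;> simp_all

theorem pvTok_none (l : List Char) (h : ∀ i, pvMatchAt (l.drop i) = none) :
    pvTok l = (l, []) := by
  induction l with
  | nil => simp [pvTok]
  | cons c cs ih =>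
    obtain ⟨hs1, hs2⟩ := pvMatchAt_none _ (by simpa using h 0)
    rw [pvTok]
    simp only [← PySem.Chars.startswith_iff] at hs1 hs2
    simp only [Bool.not_eq_true] at hs1 hs2
    simp [hs1, hs2, ih (fun i => by simpa [List.drop_succ_cons] using h (i+1))]

theorem pvTok_some (k : Nat) (l m : List Char)
    (h1 : ∀ i < k, pvMatchAt (l.drop i) = none) (h2 : pvMatchAt (l.drop k) = some m) :
    pvTok l = (l.take k, (m, (pvTok (l.drop (k + m.length))).1) ::
      (pvTok (l.drop (k + m.length))).2) := by
  induction k generalizing l with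
  | zero =>
    simp only [List.drop_zero] at h2
    have hne : l ≠ [] := by
      rcases pvMatchAt_some _ _ h2 with ⟨hm, hp⟩
      rintro rfl
      rcases hm with rfl | rfl <;> simp [List.prefix_nil] at hp <;> exact absurd hp (by decide)
    obtain ⟨c, cs, rfl⟩ := List.exists_cons_of_ne_nil hne
    unfold pvMatchAt at h2
    split_ifs at h2 with hp1 hp2
    · obtain rfl : pvM1 = m := by simpa using h2
      rw [pvTok]
      simp [(PySem.Chars.startswith_iff _ _).2 hp1]
    · obtain rfl : pvM2 = m := by simpa using h2
      rw [pvTok]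
      have hb1 : PySem.Chars.startswith (c :: cs) pvM1 = false := by
        simpa using (fun hh => hp1 ((PySem.Chars.startswith_iff _ _).1 hh))
      simp [hb1, (PySem.Chars.startswith_iff _ _).2 hp2]
  | succ k ih =>
    have hne : l ≠ [] := by
      rintro rfl
      rw [List.drop_nil, show pvMatchAt ([] : List Char) = none from by decide] at h2
      simp at h2
    obtain ⟨c, cs, rfl⟩ := List.exists_cons_of_ne_nil hne
    obtain ⟨hs1, hs2⟩ := pvMatchAt_none _ (by simpa using h1 0 (Nat.succ_pos k))
    rw [pvTok]
    simp only [← PySem.Chars.startswith_iff] at hs1 hs2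
    simp only [Bool.not_eq_true] at hs1 hs2
    have ihc := ih cs (fun i hi => by simpa [List.drop_succ_cons] using h1 (i+1) (by omega))
      (by simpa [List.drop_succ_cons] using h2)
    simp [hs1, hs2, ihc, List.take_succ_cons, Nat.succ_add]

theorem pvLoopA_render (n : Nat) : ∀ (rest : List Char), rest.length ≤ n → ∀ parts,
    pvLoopA parts rest = parts ++ pvRender (pvTok rest) := by
  induction n with
  | zero =>
    intro rest hr parts
    obtain rfl : rest = [] := by cases rest with | nil => rfl | cons a l => simp at hr
    rw [pvLoopA]
    split
    · simp [pvTok, pvRender, show PySem.Chars.strip [] = [] from by decide]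
    · rename_i idx m he
      simp [show pvFindEarliest [] = none from by decide] at he
  | succ n ih =>
    intro rest hr parts
    rw [pvLoopA]
    split
    · rename_i he
      rw [pvTok_none rest (pvFE_none rest he)]
      simp only [pvRender]
      split_ifs <;> simp_all
    · rename_i idx m he
      obtain ⟨k, rfl, hlt, hk⟩ := pvFE_some rest idx m he
      obtain ⟨hm12, hmp⟩ := pvMatchAt_some _ _ hk
      have hm1 : 1 ≤ m.length := by rcases hm12 with rfl | rfl <;> decide
      have hkm : k + m.length ≤ rest.length := by
        have := hmp.length_le
        simp only [List.length_drop] at this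
        omega
      have hsl1 : PySem.List.slice rest none (some (k : Int)) = rest.take k := by
        rw [PySem.List.slice_to rest (by positivity)]
        simp
      have hsl2 : PySem.List.slice rest (some ((k : Int) + m.length)) = rest.drop (k + m.length) := by
        rw [PySem.List.slice_from rest (by positivity)]
        congr 1
      have htok : pvTok rest = (rest.take k, (m, (pvTok (rest.drop (k + m.length))).1) ::
          (pvTok (rest.drop (k + m.length))).2) := pvTok_some k rest m hlt hk
      dsimp only
      split
      · rename_i h2
        rw [pvFN_eq, hsl2, Option.map_eq_none_iff] at h2
        have htn := pvTok_none _ (pvFE_none _ h2)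
        rw [hsl2, ih [] (by simp) _, htok, htn]
        simp only [pvTok, pvRender, hsl1, show PySem.Chars.strip [] = [] from by decide]
        split_ifs <;> simp_all
      · rename_i nidx h2
        rw [pvFN_eq, hsl2] at h2
        rw [hsl2]
        set rest1 := rest.drop (k + m.length) with hrest1
        obtain ⟨⟨idx2, m2⟩, he2, hfst⟩ := Option.map_eq_some_iff.1 h2
        simp only at hfst
        subst hfst
        obtain ⟨k2, rfl, hlt2, hk2⟩ := pvFE_some rest1 idx2 m2 he2
        have hsl3 : PySem.List.slice rest1 none (some (k2 : Int)) = rest1.take k2 := by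
          rw [PySem.List.slice_to _ (by positivity)]
          simp
        have hsl4 : PySem.List.slice rest1 (some (k2 : Int)) = rest1.drop k2 := by
          rw [PySem.List.slice_from _ (by positivity)]
          simp
        have hrest2len : (rest1.drop k2).length ≤ n := by
          simp only [hrest1, List.length_drop]
          omega
        rw [hsl3, hsl4, ih _ hrest2len _]
        have htok1 : pvTok rest1 = (rest1.take k2,
             (m2, (pvTok (rest1.drop (k2 + m2.length))).1) ::
             (pvTok (rest1.drop (k2 + m2.length))).2) := pvTok_some k2 rest1 m2 hlt2 hk2
        have htok2 : pvTok (rest1.drop k2) =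
            ([], (m2, (pvTok (rest1.drop (k2 + m2.length))).1) ::
             (pvTok (rest1.drop (k2 + m2.length))).2) := by
          have h0 : pvMatchAt ((rest1.drop k2).drop 0) = some m2 := by
            rw [List.drop_zero]
            exact hk2
          have := pvTok_some 0 (rest1.drop k2) m2 (by omega) h0
          rw [this]
          simp [List.drop_drop]
        rw [htok, htok1, htok2]
        simp only [pvRender, hsl1, show PySem.Chars.strip [] = [] from by decide]
        split_ifs <;> simp_all

theorem pvStrip_cons_ne (c : Char) (tl : List Char) (hc : PySem.Chars.isspace c = false) :
    PySem.Chars.strip (c :: tl) ≠ [] := by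
  unfold PySem.Chars.strip PySem.Chars.lstrip PySem.Chars.rstrip
  rw [List.dropWhile_cons]
  simp only [hc, Bool.false_eq_true, if_false]
  intro hnil
  rw [List.reverse_eq_nil_iff, List.dropWhile_eq_nil_iff] at hnil
  exact absurd (hnil c (by simp)) (by simp [hc])

theorem pvStrip_marker_ne (m v : List Char) (hm : m = pvM1 ∨ m = pvM2) :
    PySem.Chars.strip (m ++ ' ' :: v) ≠ [] := by
  rcases hm with rfl | rfl
  · rw [show pvM1 = 'R' :: pvM1.tail from by decide, List.cons_append]
    exact pvStrip_cons_ne _ _ (by decide)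
  · rw [show pvM2 = 'E' :: pvM2.tail from by decide, List.cons_append]
    exact pvStrip_cons_ne _ _ (by decide)

theorem pvTok_markers (n : Nat) : ∀ l : List Char, l.length ≤ n →
    ∀ q ∈ (pvTok l).2, q.1 = pvM1 ∨ q.1 = pvM2 := by
  induction n with
  | zero =>
    intro l hl
    obtain rfl : l = [] := by cases l with | nil => rfl | cons a t => simp at hl
    simp [pvTok]
  | succ n ih =>
    intro l hl q hq
    rw [pvTok.eq_def] at hq
    split at hq
    · simp at hq
    · rename_i c cs
      split_ifs at hq with hb1 hb2
      · simp only [List.mem_cons] at hq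
        rcases hq with rfl | hq
        · exact Or.inl rfl
        · exact ih _ (by simp at hl; simp [pvM1]; omega) q hq
      · simp only [List.mem_cons] at hq
        rcases hq with rfl | hq
        · exact Or.inr rfl
        · exact ih _ (by simp at hl; simp [pvM2]; omega) q hq
      · exact ih cs (by simp at hl; omega) q hq

theorem pvFilter_render (l : List Char) :
    (pvRender (pvTok l)).filter (fun p => !p.isEmpty) = pvRender (pvTok l) := by
  apply List.filter_eq_self.2
  intro p hp
  unfold pvRender at hp
  rcases List.mem_append.1 hp with h | h
  · split_ifs at h with hc
    · simp only [List.mem_singleton] at h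
      subst h
      simpa [List.isEmpty_iff] using hc
    · simp at h
  · obtain ⟨q, hq, rfl⟩ := List.mem_map.1 h
    have := pvStrip_marker_ne q.1 (PySem.Chars.strip q.2)
      (pvTok_markers l.length l le_rfl q hq)
    simpa [List.isEmpty_iff] using this

-- ===== VERDICT (by name: the statement is the Claim_ definition above) =====
theorem split_fee_paragraph_py_spec : Claim_equal_split_fee_paragraph_py := by
  intro txt _
  unfold Spec_split_fee_paragraph_py split_fee_paragraph_py split_fee_paragraph_py_alt
  rw [pvLoopA_render txt.toList.length txt.toList le_rfl []]
  rw [List.nil_append, pvFilter_render]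
  rfl
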